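-- pv_equiv track=rewrite | github.com/TrentHunter82/LatentUnderground | backend/tests/test_api_contracts.py | _paths_match
-- ===== SOURCE A (Python) =====
-- def _paths_match(frontend_path, schema_path):
--     """Check if a frontend path matches an OpenAPI schema path.
--
--     Handles parameter name differences:
--     /api/projects/{id} should match /api/projects/{project_id}
--     /api/files/{path:path} should match /api/files/{path}
--     """
--     # Strip Starlette path converters like :path
--     fp = frontend_path.replace(":path", "")
--     sp = schema_path.replace(":path", "")
--
--     fp_parts = fp.strip("/").split("/")
--     sp_parts = sp.strip("/").split("/")
--
--     if len(fp_parts) != len(sp_parts):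
--         return False
--
--     for f, s in zip(fp_parts, sp_parts):
--         if f.startswith("{") and s.startswith("{"):
--             continue  # Both are path params - match
--         if f != s:
--             return False
--     return True
-- ===== SOURCE B (Python) =====
-- def _paths_match(frontend_path, schema_path):
--     """Two-pointer character scan over the raw paths: no segment lists are built.
--
--     After the same preprocessing as before (drop ':path', strip '/'), walk both
--     strings in lockstep; at a segment start where both sides open with '{' skip
--     each side to its segment end, otherwise compare the segment character by
--     character; '/' boundaries must line up exactly."""
--     fp = frontend_path.replace(":path", "").strip("/")
--     sp = schema_path.replace(":path", "").strip("/")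
--     i = j = 0
--     n, m = len(fp), len(sp)
--     while True:
--         if i < n and fp[i] == '{' and j < m and sp[j] == '{':
--             # both segments are path parameters: skip to each segment's end
--             while i < n and fp[i] != '/':
--                 i += 1
--             while j < m and sp[j] != '/':
--                 j += 1
--         else:
--             # compare the current segments literally, character by character
--             while i < n and j < m and fp[i] == sp[j] and fp[i] != '/':
--                 i += 1
--                 j += 1
--         if not ((i == n or fp[i] == '/') and (j == m or sp[j] == '/')):
--             return False          # mismatch inside a segment
--         if i == n and j == m:
--             return True           # both paths exhausted together
--         if i == n or j == m:
--             return False          # one path has more segments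
--         i += 1                    # step over the '/'
--         j += 1
-- ===== Notes on version B (the rewrite author's own statement) =====
-- stated objective: alternative
-- what changed: Instead of splitting both paths into segment lists, checking lengths and looping pairwise over the pairs, B runs a two-pointer character-level scan over the two raw (preprocessed) strings, skipping whole '{'-parameter segments and requiring '/' boundaries to line up; no segment lists are ever built.
import Mathlib
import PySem

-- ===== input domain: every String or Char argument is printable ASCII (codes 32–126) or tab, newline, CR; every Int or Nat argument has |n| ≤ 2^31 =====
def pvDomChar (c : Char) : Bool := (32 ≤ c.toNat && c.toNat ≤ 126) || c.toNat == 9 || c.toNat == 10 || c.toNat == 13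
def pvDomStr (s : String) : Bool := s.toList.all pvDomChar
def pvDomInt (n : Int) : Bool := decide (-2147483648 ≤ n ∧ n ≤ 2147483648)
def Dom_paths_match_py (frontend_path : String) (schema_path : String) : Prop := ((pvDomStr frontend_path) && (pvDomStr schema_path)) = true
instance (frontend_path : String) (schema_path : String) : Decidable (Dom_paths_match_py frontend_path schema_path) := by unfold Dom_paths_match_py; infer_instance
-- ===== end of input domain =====

-- B replaces A's split-into-segments + length check + pairwise loop by a two-pointer
-- character-level scan over the raw (preprocessed) strings that never builds segment
-- lists; objective: alternative.

-- ===== PORT A =====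
-- the zip loop of A, transcribed as recursion over the two part lists in step
def pmLoopA : List String → List String → Bool
  | f :: fs, s :: ss =>
      if PySem.Str.startswith f "{" && PySem.Str.startswith s "{" then pmLoopA fs ss
      else if f ≠ s then false
      else pmLoopA fs ss
  | _, _ => true

def paths_match_py (frontend_path : String) (schema_path : String) : Bool :=
  let fp := PySem.Str.replace frontend_path ":path" ""
  let sp := PySem.Str.replace schema_path ":path" ""
  -- .split("/") with a nonempty separator is always `some`; getD [] only totalizes
  let fp_parts := (PySem.Str.split? (PySem.Str.stripChars fp "/") "/").getD []
  let sp_parts := (PySem.Str.split? (PySem.Str.stripChars sp "/") "/").getD []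
  if fp_parts.length ≠ sp_parts.length then false
  else pmLoopA fp_parts sp_parts

-- ===== PORT B =====
-- Source B's inner `while fp[i] != '/'` skip loop
def pvSkipSeg : List Char → List Char
  | [] => []
  | c :: cs => if c ≠ '/' then pvSkipSeg cs else c :: cs

theorem pvSkipSeg_length_le (cs : List Char) : (pvSkipSeg cs).length ≤ cs.length := by
  induction cs with
  | nil => simp [pvSkipSeg]
  | cons c cs ih => simp only [pvSkipSeg]; split <;> simp <;> omega

mutual
-- one iteration of Source B's outer `while True` loop, at a segment start in both paths
def pvSeg (cs ds : List Char) : Bool :=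
  if cs.head? = some '{' ∧ ds.head? = some '{' then
    pvLit (pvSkipSeg cs) (pvSkipSeg ds)
  else
    pvLit cs ds
  termination_by (cs.length + ds.length + 1, 0)
  decreasing_by
  · exact Prod.Lex.left _ _ (by have h1 := pvSkipSeg_length_le cs; have h2 := pvSkipSeg_length_le ds; omega)
  · exact Prod.Lex.left _ _ (by omega)

-- Source B's literal character comparison loop followed by its boundary checks
def pvLit : List Char → List Char → Bool
  | [], [] => true
  | c :: cs, d :: ds =>
      if c = '/' ∧ d = '/' then pvSeg cs ds
      else if c = d ∧ c ≠ '/' then pvLit cs ds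
      else false
  | _, _ => false
  termination_by cs ds => (cs.length + ds.length, 1)
  decreasing_by
  · exact Prod.Lex.left _ _ (by simp only [List.length_cons]; omega)
  · exact Prod.Lex.left _ _ (by simp only [List.length_cons]; omega)
end

def paths_match_py_alt (frontend_path : String) (schema_path : String) : Bool :=
  let fp := PySem.Str.stripChars (PySem.Str.replace frontend_path ":path" "") "/"
  let sp := PySem.Str.stripChars (PySem.Str.replace schema_path ":path" "") "/"
  pvSeg fp.toList sp.toList

-- ===== PRECONDITION & SPEC =====
def Spec_paths_match_py (frontend_path : String) (schema_path : String) (out : Bool) : Prop := out = paths_match_py_alt frontend_path schema_path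
instance (frontend_path : String) (schema_path : String) (out : Bool) : Decidable (Spec_paths_match_py frontend_path schema_path out) := by unfold Spec_paths_match_py; infer_instance

-- ===== CLAIM (what is proved, stated in full; the proofs are below) =====
def Claim_equal_paths_match_py : Prop := ∀ (frontend_path : String) (schema_path : String), Dom_paths_match_py frontend_path schema_path → Spec_paths_match_py frontend_path schema_path (paths_match_py frontend_path schema_path)

-- ===== LEMMAS AND PROOFS =====

-- structural split on '/', the reference shape both ports are reduced to
def pvSplit : List Char → List (List Char)
  | [] => [[]]
  | c :: cs =>
      if c = '/' then [] :: pvSplit cs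
      else match pvSplit cs with
        | p :: ps => (c :: p) :: ps
        | [] => [[c]]

theorem pvSplit_ne_nil (cs : List Char) : pvSplit cs ≠ [] := by
  cases cs with
  | nil => simp [pvSplit]
  | cons c cs =>
    simp only [pvSplit]
    split
    · simp
    · split <;> simp

def pvConsHead (p : List Char) : List (List Char) → List (List Char)
  | q :: qs => (p ++ q) :: qs
  | [] => [p]

theorem splitOn_go_slash (fuel : Nat) : ∀ (l cur : List Char) (acc : List (List Char)),
    l.length ≤ fuel →
    PySem.Chars.splitOn.go ['/'] fuel l cur acc = acc.reverse ++ pvConsHead cur.reverse (pvSplit l) := by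
  induction fuel with
  | zero =>
    intro l cur acc h
    have hl : l = [] := by cases l <;> simp at h ⊢
    subst hl
    simp [PySem.Chars.splitOn.go, pvSplit, pvConsHead]
  | succ fuel ih =>
    intro l cur acc h
    cases l with
    | nil => simp [PySem.Chars.splitOn.go, pvSplit, pvConsHead]
    | cons c rest =>
      by_cases hc : c = '/'
      · subst hc
        rw [show PySem.Chars.splitOn.go ['/'] (fuel+1) ('/' :: rest) cur acc
              = PySem.Chars.splitOn.go ['/'] fuel rest [] (cur.reverse :: acc) by
            simp [PySem.Chars.splitOn.go, List.isPrefixOf]]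
        rw [ih rest [] (cur.reverse :: acc) (by simpa using Nat.le_of_succ_le_succ (by simpa using h))]
        obtain ⟨p, ps, hps⟩ : ∃ p ps, pvSplit rest = p :: ps := by
          cases hx : pvSplit rest with
          | nil => exact absurd hx (pvSplit_ne_nil rest)
          | cons p ps => exact ⟨p, ps, rfl⟩
        simp [hps, pvConsHead, pvSplit]
      · rw [show PySem.Chars.splitOn.go ['/'] (fuel+1) (c :: rest) cur acc
              = PySem.Chars.splitOn.go ['/'] fuel rest (c :: cur) acc by
            simp only [PySem.Chars.splitOn.go, List.isPrefixOf]
            simp only [Bool.and_eq_true, beq_iff_eq]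
            rw [if_neg (fun h' => hc h'.1.symm)]]
        rw [ih rest (c :: cur) acc (by simpa using Nat.le_of_succ_le_succ (by simpa using h))]
        obtain ⟨p, ps, hps⟩ : ∃ p ps, pvSplit rest = p :: ps := by
          cases hx : pvSplit rest with
          | nil => exact absurd hx (pvSplit_ne_nil rest)
          | cons p ps => exact ⟨p, ps, rfl⟩
        simp [hps, pvConsHead, pvSplit, hc]

theorem splitOn_slash (cs : List Char) : PySem.Chars.splitOn cs ['/'] = pvSplit cs := by
  rw [PySem.Chars.splitOn, splitOn_go_slash (cs.length + 1) cs [] [] (by omega)]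
  obtain ⟨p, ps, hps⟩ : ∃ p ps, pvSplit cs = p :: ps := by
    cases hx : pvSplit cs with
    | nil => exact absurd hx (pvSplit_ne_nil cs)
    | cons p ps => exact ⟨p, ps, rfl⟩
  simp [hps, pvConsHead]

-- the segment-list matcher both ports compute
def pvSM : List (List Char) → List (List Char) → Bool
  | [], [] => true
  | f :: fs, s :: ss =>
      if PySem.Chars.startswith f ['{'] && PySem.Chars.startswith s ['{'] then pvSM fs ss
      else if f = s then pvSM fs ss else false
  | _, _ => false

-- ## A side: length check + pmLoopA = pvSM
theorem loopA_eq_pvSM : ∀ (xs ys : List (List Char)),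
    (if (xs.map String.ofList).length ≠ (ys.map String.ofList).length then false
     else pmLoopA (xs.map String.ofList) (ys.map String.ofList)) = pvSM xs ys := by
  intro xs
  induction xs with
  | nil => intro ys; cases ys <;> simp [pmLoopA, pvSM]
  | cons f fs ih =>
    intro ys
    cases ys with
    | nil => simp [pvSM]
    | cons s ss =>
      have hsw : ∀ t : List Char,
          PySem.Str.startswith (String.ofList t) "{" = PySem.Chars.startswith t ['{'] := by
        intro t
        rw [PySem.Str.startswith_eq, String.toList_ofList,
          show ("{" : String).toList = ['{'] from by simp]
      have ihs := ih ss
      by_cases hlen : fs.length = ss.length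
      · simp only [List.length_map, hlen, ne_eq, not_true_eq_false, if_false,
          Bool.false_eq_true] at ihs
        simp only [List.map_cons, List.length_cons, List.length_map, hlen, ne_eq,
          not_true_eq_false, if_false, Bool.false_eq_true]
        rw [pmLoopA]
        simp only [hsw, String.ofList_inj]
        rw [pvSM.eq_2]
        by_cases hb : (PySem.Chars.startswith f ['{'] && PySem.Chars.startswith s ['{']) = true
        · rw [if_pos hb, if_pos hb, ihs]
        · rw [if_neg hb, if_neg hb]
          by_cases hfs : f = s
          · simp [hfs, ihs]
          · have hne : String.ofList f ≠ String.ofList s := by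
              simpa [String.ofList_inj] using hfs
            simp [hfs, hne]
      · have h1 : ((f :: fs).map String.ofList).length ≠ ((s :: ss).map String.ofList).length := by
          simp [hlen]
        rw [if_pos h1]
        simp only [List.length_map, if_neg (by simpa using hlen)] at ihs
        rw [if_pos (by simpa using hlen)] at ihs
        rw [pvSM.eq_2, ← ihs]
        split_ifs <;> simp

-- ## B side: pvSeg = pvSM on the splits
theorem startswith_head (f : List Char) : PySem.Chars.startswith f ['{'] = (f.head? == some '{') := by
  cases f <;> simp [PySem.Chars.startswith, List.isPrefixOf, eq_comm]

theorem pvSkipSeg_eq_dropWhile (cs : List Char) : pvSkipSeg cs = cs.dropWhile (· ≠ '/') := by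
  induction cs with
  | nil => simp [pvSkipSeg]
  | cons c cs ih => simp only [pvSkipSeg, List.dropWhile_cons]; split <;> simp_all

def pvTail (cs : List Char) : List (List Char) :=
  match cs.dropWhile (· ≠ '/') with
  | [] => []
  | _ :: r => pvSplit r

theorem pvSplit_cons_take (cs : List Char) :
    pvSplit cs = (cs.takeWhile (· ≠ '/')) :: pvTail cs := by
  induction cs with
  | nil => simp [pvSplit, pvTail]
  | cons c cs ih =>
    by_cases hc : c = '/'
    · subst hc
      simp [pvSplit, pvTail, List.takeWhile_cons, List.dropWhile_cons]
    · simp only [pvSplit, if_neg hc, ih, List.takeWhile_cons, List.dropWhile_cons,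
        if_pos (by simpa using hc), pvTail]
      simp [hc]

theorem dropWhile_ok (cs : List Char) :
    cs.dropWhile (· ≠ '/') = [] ∨ (cs.dropWhile (· ≠ '/')).head? = some '/' := by
  induction cs with
  | nil => simp
  | cons c cs ih =>
    by_cases hc : c = '/'
    · subst hc; simp [List.dropWhile_cons]
    · simpa [List.dropWhile_cons, hc] using ih

theorem startswith_takeWhile (cs : List Char) :
    PySem.Chars.startswith (cs.takeWhile (· ≠ '/')) ['{'] = (cs.head? == some '{') := by
  cases cs with
  | nil => simp [startswith_head]
  | cons c cs =>
    by_cases hc : c = '/'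
    · subst hc; simp [List.takeWhile_cons, startswith_head]
    · simp [List.takeWhile_cons, hc, startswith_head]

theorem pvPred_norm : (fun x : Char => !decide (x = '/')) = (fun x : Char => decide (x ≠ '/')) := by
  funext x; simp

def pvBnd : List Char → List Char → Bool
  | [], [] => true
  | c :: a, d :: b => if c = '/' ∧ d = '/' then pvSeg a b else false
  | _, _ => false

theorem lit_split (p : List Char) : ∀ (q r1 r2 : List Char),
    (∀ c ∈ p, c ≠ '/') → (∀ c ∈ q, c ≠ '/') →
    (r1 = [] ∨ r1.head? = some '/') → (r2 = [] ∨ r2.head? = some '/') →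
    pvLit (p ++ r1) (q ++ r2) = if p = q then pvBnd r1 r2 else false := by
  induction p with
  | nil =>
    intro q r1 r2 _ hq h1 h2
    cases q with
    | nil =>
      simp only [List.nil_append, if_pos rfl]
      rcases h1 with h1 | h1 <;> rcases h2 with h2 | h2
      · subst h1; subst h2; simp [pvLit, pvBnd]
      · subst h1
        cases r2 with
        | nil => simp at h2
        | cons d b =>
          simp only [List.head?_cons, Option.some.injEq] at h2
          simp [pvLit, pvBnd]
      · subst h2
        cases r1 with
        | nil => simp at h1
        | cons c a =>
          simp only [List.head?_cons, Option.some.injEq] at h1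
          simp [pvLit, pvBnd]
      · cases r1 with
        | nil => simp at h1
        | cons c a =>
          cases r2 with
          | nil => simp at h2
          | cons d b =>
            simp only [List.head?_cons, Option.some.injEq] at h1 h2
            subst h1; subst h2
            simp [pvLit, pvBnd]
    | cons d q' =>
      simp only [List.nil_append, List.cons_append, if_neg (by simp : ¬([] : List Char) = d :: q')]
      have hd : d ≠ '/' := hq d (by simp)
      rcases h1 with h1 | h1
      · subst h1; simp [pvLit]
      · cases r1 with
        | nil => simp at h1
        | cons c a =>
          simp only [List.head?_cons, Option.some.injEq] at h1
          subst h1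
          simp [pvLit, hd]
  | cons c p' ih =>
    intro q r1 r2 hp hq h1 h2
    have hc : c ≠ '/' := hp c (by simp)
    cases q with
    | nil =>
      simp only [List.cons_append, List.nil_append,
        if_neg (by simp : ¬(c :: p') = ([] : List Char))]
      rcases h2 with h2 | h2
      · subst h2; simp [pvLit]
      · cases r2 with
        | nil => simp at h2
        | cons d b =>
          simp only [List.head?_cons, Option.some.injEq] at h2
          subst h2
          simp [pvLit, hc]
    | cons d q' =>
      have hd : d ≠ '/' := hq d (by simp)
      simp only [List.cons_append]
      rw [pvLit.eq_2]
      rw [if_neg (by rintro ⟨h, -⟩; exact hc h)]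
      by_cases hcd : c = d
      · subst hcd
        rw [if_pos ⟨rfl, hc⟩]
        rw [ih q' r1 r2 (fun x hx => hp x (by simp [hx])) (fun x hx => hq x (by simp [hx])) h1 h2]
        by_cases hpq : p' = q'
        · simp [hpq]
        · simp [hpq]
      · rw [if_neg (by rintro ⟨h, -⟩; exact hcd h)]
        rw [if_neg (by intro h; injection h with h1 h2; exact hcd h1)]

theorem seg_eq_pvSM : ∀ (n : Nat) (cs ds : List Char), cs.length + ds.length ≤ n →
    pvSeg cs ds = pvSM (pvSplit cs) (pvSplit ds) := by
  intro n
  induction n with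
  | zero =>
    intro cs ds h
    have h1 : cs = [] := by cases cs <;> simp_all
    have h2 : ds = [] := by cases ds <;> simp_all
    subst h1; subst h2
    simp [pvSeg, pvLit, pvSplit, pvSM, startswith_head]
  | succ n ih =>
    intro cs ds h
    have hfree1 : ∀ c ∈ cs.takeWhile (· ≠ '/'), c ≠ '/' := by
      intro c hc; simpa using List.mem_takeWhile_imp hc
    have hfree2 : ∀ c ∈ ds.takeWhile (· ≠ '/'), c ≠ '/' := by
      intro c hc; simpa using List.mem_takeWhile_imp hc
    have hbnd : pvBnd (cs.dropWhile (· ≠ '/')) (ds.dropWhile (· ≠ '/'))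
        = pvSM (pvTail cs) (pvTail ds) := by
      rcases hA : cs.dropWhile (· ≠ '/') with _ | ⟨c, a⟩ <;>
        rcases hB : ds.dropWhile (· ≠ '/') with _ | ⟨d, b⟩
      · simp [pvBnd, pvSM, pvTail, pvPred_norm, hA, hB]
      · obtain ⟨p, ps, hps⟩ : ∃ p ps, pvSplit b = p :: ps := by
          cases hx : pvSplit b with
          | nil => exact absurd hx (pvSplit_ne_nil b)
          | cons p ps => exact ⟨p, ps, rfl⟩
        simp [pvBnd, pvSM, pvTail, pvPred_norm, hA, hB, hps]
      · obtain ⟨p, ps, hps⟩ : ∃ p ps, pvSplit a = p :: ps := by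
          cases hx : pvSplit a with
          | nil => exact absurd hx (pvSplit_ne_nil a)
          | cons p ps => exact ⟨p, ps, rfl⟩
        simp [pvBnd, pvSM, pvTail, pvPred_norm, hA, hB, hps]
      · have hc : c = '/' := by
          have := dropWhile_ok cs; rw [hA] at this; simpa using this
        have hd : d = '/' := by
          have := dropWhile_ok ds; rw [hB] at this; simpa using this
        subst hc; subst hd
        have hlen1 : a.length + 1 ≤ cs.length := by
          have := List.length_dropWhile_le (p := fun c => decide (c ≠ '/')) (l := cs)
          rw [hA] at this; simpa using this
        have hlen2 : b.length + 1 ≤ ds.length := by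
          have := List.length_dropWhile_le (p := fun c => decide (c ≠ '/')) (l := ds)
          rw [hB] at this; simpa using this
        rw [show pvBnd ('/' :: a) ('/' :: b) = pvSeg a b from by simp [pvBnd]]
        rw [ih a b (by omega)]
        simp [pvTail, pvPred_norm, hA, hB]
    rw [pvSplit_cons_take cs, pvSplit_cons_take ds, pvSM.eq_2, pvSeg]
    by_cases hbr : cs.head? = some '{' ∧ ds.head? = some '{'
    · rw [if_pos hbr,
        if_pos (by simp only [startswith_takeWhile, Bool.and_eq_true, beq_iff_eq]
                   exact hbr)]
      rw [pvSkipSeg_eq_dropWhile, pvSkipSeg_eq_dropWhile]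
      rw [show pvLit (cs.dropWhile (· ≠ '/')) (ds.dropWhile (· ≠ '/'))
            = pvBnd (cs.dropWhile (· ≠ '/')) (ds.dropWhile (· ≠ '/')) from by
          simpa using lit_split [] [] (cs.dropWhile (· ≠ '/')) (ds.dropWhile (· ≠ '/'))
            (by simp) (by simp) (dropWhile_ok cs) (dropWhile_ok ds)]
      exact hbnd
    · rw [if_neg hbr,
        if_neg (by simp only [startswith_takeWhile, Bool.and_eq_true, beq_iff_eq]
                   exact hbr)]
      conv_lhs =>
        rw [show cs = cs.takeWhile (· ≠ '/') ++ cs.dropWhile (· ≠ '/') from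
              (List.takeWhile_append_dropWhile).symm,
            show ds = ds.takeWhile (· ≠ '/') ++ ds.dropWhile (· ≠ '/') from
              (List.takeWhile_append_dropWhile).symm]
      rw [lit_split _ _ _ _ hfree1 hfree2 (dropWhile_ok cs) (dropWhile_ok ds)]
      split_ifs with hpq
      · exact hbnd
      · rfl

-- ===== VERDICT (by name: the statement is the Claim_ definition above) =====
theorem paths_match_py_spec : Claim_equal_paths_match_py := by
  intro fp sp _
  unfold Spec_paths_match_py paths_match_py paths_match_py_alt
  have key : ∀ S : String,
      (PySem.Str.split? S "/").getD [] = (pvSplit S.toList).map String.ofList := by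
    intro S
    rw [PySem.Str.split?]
    simp [PySem.Chars.split?, show ("/" : String).toList = ['/'] from by simp, splitOn_slash]
  simp only [key]
  rw [loopA_eq_pvSM]
  exact (seg_eq_pvSM _ _ _ le_rfl).symm
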